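-- pv_equiv track=rewrite | github.com/CocoMarck/modulosUtilPy | Separar_Util/Modulo_Text.py | Text_Separe
-- ===== SOURCE A (Python) =====
-- def Text_Separe(
--     text='variable=Valor',
--     text_separe='='
-- ):
--     '''Para separar el texto en 2 y almacenarlo en un diccionario'''
--
--     text_dict = {}
--     if (
--         '\n' in text and
--         text_separe in text
--     ):
--         # Cuando hay saltos de linea y separador
--         for line in text.split('\n'):
--             line = Text_Separe(text=line, text_separe=text_separe)
--             for key in line.keys():
--                 text_dict.update( {key : line[key]} )
--
--     elif text_separe in text:
--         # Cuando solo hay separador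
--         text = text.split(text_separe)
--         text_dict.update( {text[0] : text[1]} )
--     else:
--         pass
--
--     return text_dict
-- ===== SOURCE B (Python) =====
-- def Text_Separe(
--     text='variable=Valor',
--     text_separe='='
-- ):
--     '''Para separar el texto en 2 y almacenarlo en un diccionario'''
--     text_dict = {}
--     for line in text.split('\n'):
--         if text_separe in line:
--             parts = line.split(text_separe)
--             text_dict[parts[0]] = parts[1]
--     return text_dict
-- ===== Notes on version B (the rewrite author's own statement) =====
-- stated objective: simpler
-- what changed: Replaced A's self-recursion (recurse per line, then merge each one-entry sub-dictionary back in) by a single flat loop over the lines of the text that assigns parts[0]->parts[1] whenever the separator occurs in the line.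
import Mathlib
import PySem

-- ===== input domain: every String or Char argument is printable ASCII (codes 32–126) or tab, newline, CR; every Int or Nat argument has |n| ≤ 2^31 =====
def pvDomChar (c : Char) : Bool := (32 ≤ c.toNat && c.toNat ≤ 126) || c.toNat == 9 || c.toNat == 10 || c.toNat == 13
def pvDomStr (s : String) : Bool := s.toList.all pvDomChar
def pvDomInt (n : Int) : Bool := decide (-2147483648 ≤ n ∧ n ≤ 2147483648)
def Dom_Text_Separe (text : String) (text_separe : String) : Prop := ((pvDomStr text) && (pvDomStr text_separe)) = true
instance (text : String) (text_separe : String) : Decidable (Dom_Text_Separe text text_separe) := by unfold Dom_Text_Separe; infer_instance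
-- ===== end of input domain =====

-- B replaces A's per-line self-recursion + dict-merge by one flat loop over the lines (simpler; equivalence of return values, no mutation involved).


-- ===== PORT A =====
-- Fuel only makes the recursion total: the top call passes text.toList.length + 1,
-- which is always enough (the recursive branch needs '\n' in text, and lines of
-- text.split('\n') contain no '\n'), so the fuel-0 default is never reached.
def TS_go (fuel : Nat) (text : String) (text_separe : String) : PySem.Dict String String :=
  match fuel with
  | 0 => PySem.Dict.empty
  | fuel + 1 =>
    if PySem.Str.isIn "\n" text && PySem.Str.isIn text_separe text then
      -- for line in text.split('\n'): line = Text_Separe(line, sep); for key in line.keys(): text_dict.update({key: line[key]})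
      ((PySem.Str.split? text "\n").getD []).foldl
        (fun d line =>
          let ld := TS_go fuel line text_separe
          ld.keys.foldl (fun d key => d.insert key (ld.getD key "")) d)
        PySem.Dict.empty
    else if PySem.Str.isIn text_separe text then
      -- text = text.split(text_separe); text_dict.update({text[0]: text[1]})
      let parts := (PySem.Str.split? text text_separe).getD []
      (PySem.Dict.empty : PySem.Dict String String).insert
        (PySem.List.pyGetD parts 0 "") (PySem.List.pyGetD parts 1 "")
    else PySem.Dict.empty

def Text_Separe (text : String) (text_separe : String) : List (String × String) :=
  (TS_go (text.toList.length + 1) text text_separe).items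

-- ===== PORT B =====
def Text_Separe_alt (text : String) (text_separe : String) : List (String × String) :=
  (((PySem.Str.split? text "\n").getD []).foldl
      (fun d line =>
        if PySem.Str.isIn text_separe line then
          let parts := (PySem.Str.split? line text_separe).getD []
          d.insert (PySem.List.pyGetD parts 0 "") (PySem.List.pyGetD parts 1 "")
        else d)
      (PySem.Dict.empty : PySem.Dict String String)).items

-- ===== PRECONDITION & SPEC =====
-- Pre_ excludes only the empty separator, on which Python's str.split raises ValueError.
def Pre_Text_Separe (text : String) (text_separe : String) : Prop := text_separe ≠ ""
instance (text : String) (text_separe : String) : Decidable (Pre_Text_Separe text text_separe) := by unfold Pre_Text_Separe; infer_instance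
def pvWitness_Text_Separe : String × String := ("a=b\nc=d", "=")

def Spec_Text_Separe (text : String) (text_separe : String) (out : List (String × String)) : Prop := out = Text_Separe_alt text text_separe
instance (text : String) (text_separe : String) (out : List (String × String)) : Decidable (Spec_Text_Separe text text_separe out) := by unfold Spec_Text_Separe; infer_instance

-- ===== CLAIM (what is proved, stated in full; the proofs are below) =====
def Claim_equal_Text_Separe : Prop := ∀ (text : String) (text_separe : String), Dom_Text_Separe text text_separe → Pre_Text_Separe text text_separe → Spec_Text_Separe text text_separe (Text_Separe text text_separe)

-- ===== LEMMAS AND PROOFS =====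

-- A clean recursion computing s.split(c) for a single character c.
def splitChar (c : Char) : List Char → List (List Char)
  | [] => [[]]
  | a :: rest =>
    if a = c then [] :: splitChar c rest
    else
      match splitChar c rest with
      | [] => [[a]]
      | p :: ps => (a :: p) :: ps

theorem splitChar_ne_nil (c : Char) (l : List Char) : splitChar c l ≠ [] := by
  induction l with
  | nil => simp [splitChar]
  | cons a rest ih =>
    simp only [splitChar]
    split_ifs
    · simp
    · cases h : splitChar c rest <;> simp

theorem go_eq_splitChar (c : Char) :
    ∀ (fuel : Nat) (l cur : List Char) (acc : List (List Char)), l.length < fuel →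
    PySem.Chars.splitOn.go [c] fuel l cur acc =
      acc.reverse ++
        (match splitChar c l with
         | [] => []
         | p :: ps => (cur.reverse ++ p) :: ps) := by
  intro fuel
  induction fuel with
  | zero => intro l cur acc h; omega
  | succ fuel ih =>
    intro l cur acc h
    cases l with
    | nil => simp [PySem.Chars.splitOn.go, splitChar]
    | cons a rest =>
      simp only [PySem.Chars.splitOn.go]
      by_cases hac : a = c
      · have hp : List.isPrefixOf [c] (a :: rest) = true := by
          simp [List.isPrefixOf, hac]
        rw [if_pos hp]
        have := ih rest [] (cur.reverse :: acc) (by simpa using Nat.lt_of_succ_lt_succ h)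
        simp only [List.length_cons] at this
        rw [show List.drop (List.length [c]) (a :: rest) = rest by simp]
        rw [this]
        simp only [splitChar, if_pos hac]
        cases hsc : splitChar c rest with
        | nil => exact absurd hsc (splitChar_ne_nil c rest)
        | cons p ps => simp
      · have hp : List.isPrefixOf [c] (a :: rest) = false := by
          simp [List.isPrefixOf]; exact fun hh => hac hh.symm
        rw [if_neg (by simp [hp])]
        have := ih rest (a :: cur) acc (by simpa using Nat.lt_of_succ_lt_succ h)
        rw [this]
        simp only [splitChar, if_neg hac]
        cases hsc : splitChar c rest with
        | nil => exact absurd hsc (splitChar_ne_nil c rest)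
        | cons p ps => simp

theorem splitOn_single (c : Char) (cs : List Char) :
    PySem.Chars.splitOn cs [c] = splitChar c cs := by
  unfold PySem.Chars.splitOn
  rw [go_eq_splitChar c (cs.length + 1) cs [] [] (Nat.lt_succ_self _)]
  cases h : splitChar c cs with
  | nil => exact absurd h (splitChar_ne_nil c cs)
  | cons p ps => simp

theorem mem_splitChar_not_mem {c : Char} {cs l : List Char}
    (h : l ∈ splitChar c cs) : c ∉ l := by
  induction cs generalizing l with
  | nil => simp [splitChar] at h; simp [h]
  | cons a rest ih =>
    simp only [splitChar] at h
    by_cases hac : a = c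
    · rw [if_pos hac] at h
      rcases List.mem_cons.mp h with h | h
      · simp [h]
      · exact ih h
    · rw [if_neg hac] at h
      cases hsc : splitChar c rest with
      | nil => exact absurd hsc (splitChar_ne_nil c rest)
      | cons p ps =>
        rw [hsc] at h
        rcases List.mem_cons.mp h with h | h
        · subst h
          intro hmem
          rcases List.mem_cons.mp hmem with h' | h'
          · exact hac h'.symm
          · exact ih (by rw [hsc]; exact List.mem_cons_self) h'
        · exact ih (by rw [hsc]; exact List.mem_cons_of_mem _ h)

theorem splitChar_head_prefix (c : Char) (cs : List Char) :
    ∀ p ps, splitChar c cs = p :: ps → p <+: cs := by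
  induction cs with
  | nil => intro p ps h; simp [splitChar] at h; simp [h.1]
  | cons a rest ih =>
    intro p ps h
    simp only [splitChar] at h
    by_cases hac : a = c
    · rw [if_pos hac] at h
      rw [List.cons.injEq] at h
      rw [← h.1]
      exact List.nil_prefix
    · rw [if_neg hac] at h
      cases hsc : splitChar c rest with
      | nil => exact absurd hsc (splitChar_ne_nil c rest)
      | cons q qs =>
        rw [hsc, List.cons.injEq] at h
        rw [← h.1]
        exact List.cons_prefix_cons.mpr ⟨rfl, ih q qs hsc⟩

theorem mem_splitChar_infix {c : Char} {cs l : List Char}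
    (h : l ∈ splitChar c cs) : l <:+: cs := by
  induction cs generalizing l with
  | nil => simp [splitChar] at h; simp [h]
  | cons a rest ih =>
    simp only [splitChar] at h
    by_cases hac : a = c
    · rw [if_pos hac] at h
      rcases List.mem_cons.mp h with h | h
      · simp [h]
      · exact List.infix_cons (ih h)
    · rw [if_neg hac] at h
      cases hsc : splitChar c rest with
      | nil => exact absurd hsc (splitChar_ne_nil c rest)
      | cons p ps =>
        rw [hsc] at h
        rcases List.mem_cons.mp h with h | h
        · subst h
          exact (List.cons_prefix_cons.mpr ⟨rfl, splitChar_head_prefix c rest p ps hsc⟩).isInfix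
        · exact List.infix_cons (ih (by rw [hsc]; exact List.mem_cons_of_mem _ h))

theorem splitChar_of_not_mem {c : Char} {cs : List Char} (h : c ∉ cs) :
    splitChar c cs = [cs] := by
  induction cs with
  | nil => simp [splitChar]
  | cons a rest ih =>
    simp only [List.mem_cons, not_or] at h
    simp only [splitChar]
    rw [ih h.2, if_neg (fun hh => h.1 hh.symm)]

theorem split_newline (text : String) :
    PySem.Str.split? text "\n" = some ((splitChar '\n' text.toList).map String.ofList) := by
  have h : ("\n" : String).toList = ['\n'] := by decide
  simp [PySem.Str.split?, PySem.Chars.split?, h, splitOn_single]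

theorem TS_go_succ_no_nl (fuel : Nat) (line sep : String)
    (h : PySem.Str.isIn "\n" line = false) :
    TS_go (fuel + 1) line sep =
      if PySem.Str.isIn sep line then
        (PySem.Dict.empty : PySem.Dict String String).insert
          (PySem.List.pyGetD ((PySem.Str.split? line sep).getD []) 0 "")
          (PySem.List.pyGetD ((PySem.Str.split? line sep).getD []) 1 "")
      else PySem.Dict.empty := by
  have h' : PySem.Chars.isIn ['\n'] line.toList = false := by
    rw [← show ("\n" : String).toList = ['\n'] from by decide]; exact h
  simp [TS_go, h']

theorem stepA_eq (fuel : Nat) (sep line : String) (d : PySem.Dict String String)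
    (h : PySem.Str.isIn "\n" line = false) :
    (let ld := TS_go (fuel + 1) line sep;
      ld.keys.foldl (fun d key => d.insert key (ld.getD key "")) d) =
      if PySem.Str.isIn sep line then
        d.insert (PySem.List.pyGetD ((PySem.Str.split? line sep).getD []) 0 "")
          (PySem.List.pyGetD ((PySem.Str.split? line sep).getD []) 1 "")
      else d := by
  rw [TS_go_succ_no_nl fuel line sep h]
  by_cases hs : PySem.Str.isIn sep line = true
  · simp only [if_pos hs]
    simp [PySem.Dict.insert, PySem.Dict.contains, PySem.Dict.keys, PySem.Dict.getD,
      PySem.Dict.get?, PySem.Dict.empty]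
  · simp only [Bool.not_eq_true] at hs
    have hs' : PySem.Chars.isIn sep.toList line.toList = false := hs
    simp [hs', PySem.Dict.keys, PySem.Dict.empty]

theorem isIn_ofList_line (sub : String) (l : List Char) :
    PySem.Str.isIn sub (String.ofList l) = PySem.Chars.isIn sub.toList l := by
  simp [PySem.Str.isIn, String.toList_ofList]

-- ===== VERDICT (by name: the statement is the Claim_ definition above) =====
theorem Text_Separe_spec : Claim_equal_Text_Separe := by
  intro text sep _hdom _hpre
  unfold Spec_Text_Separe Text_Separe Text_Separe_alt
  by_cases hn : PySem.Str.isIn "\n" text = true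
  · have hmem : '\n' ∈ text.toList := by
      have h1 := (PySem.Str.isIn_iff_infix _ _).mp hn
      rw [show ("\n" : String).toList = ['\n'] from by decide] at h1
      exact (List.singleton_infix_iff _ _).mp h1
    have hne : text.toList ≠ [] := List.ne_nil_of_mem hmem
    obtain ⟨k, hk⟩ : ∃ k, text.toList.length = k + 1 := by
      cases h : text.toList with
      | nil => exact absurd h hne
      | cons a r => exact ⟨r.length, by simp⟩
    rw [hk]
    by_cases hs : PySem.Str.isIn sep text = true
    · -- A takes the recursive branch; each line has no newline
      have hn' : PySem.Chars.isIn ['\n'] text.toList = true := by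
        rw [← show ("\n" : String).toList = ['\n'] from by decide]; exact hn
      have hs' : PySem.Chars.isIn sep.toList text.toList = true := hs
      simp only [TS_go]
      rw [if_pos (by simp [hn', hs'])]
      rw [split_newline]
      congr 1
      apply PySem.List.foldl_congr_mem
      intro d line hline
      obtain ⟨l, hl, rfl⟩ := List.mem_map.mp hline
      have hno : PySem.Str.isIn "\n" (String.ofList l) = false := by
        rw [isIn_ofList_line]
        rw [PySem.Chars.isIn_eq_false_iff]
        rw [show ("\n" : String).toList = ['\n'] from by decide]
        rw [List.singleton_infix_iff]
        exact mem_splitChar_not_mem hl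
      exact stepA_eq k sep (String.ofList l) d hno
    · -- separator absent: A returns {}, every B step skips
      simp only [Bool.not_eq_true] at hs
      have hs' : PySem.Chars.isIn sep.toList text.toList = false := hs
      simp only [TS_go]
      rw [if_neg (by simp [hs']), if_neg (by simp [hs'])]
      rw [split_newline]
      refine Eq.symm ?_
      simp only [Option.getD_some]
      rw [PySem.List.foldl_congr_mem _ _ (fun d _ => d) _ ?_]
      · rw [List.foldl_fixed]
      · intro d line hline
        obtain ⟨l, hl, rfl⟩ := List.mem_map.mp hline
        have hfalse : PySem.Chars.isIn sep.toList l = false := by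
          rw [PySem.Chars.isIn_eq_false_iff]
          intro hinf
          have h2 : sep.toList <:+: text.toList := hinf.trans (mem_splitChar_infix hl)
          rw [← PySem.Chars.isIn_iff_infix] at h2
          rw [h2] at hs'
          simp at hs'
        simp [PySem.Str.isIn, String.toList_ofList, hfalse]
  · -- no newline: split gives the single line [text]
    simp only [Bool.not_eq_true] at hn
    have hnm : '\n' ∉ text.toList := by
      intro hmem
      have h1 : PySem.Str.isIn "\n" text = true := by
        rw [PySem.Str.isIn_iff_infix, show ("\n" : String).toList = ['\n'] from by decide]
        exact (List.singleton_infix_iff _ _).mpr hmem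
      rw [hn] at h1
      exact absurd h1 (by decide)
    have hsplit : (PySem.Str.split? text "\n").getD [] = [text] := by
      rw [split_newline, splitChar_of_not_mem hnm]
      simp [String.ofList_toList]
    have hn' : PySem.Chars.isIn ['\n'] text.toList = false := by
      rw [← show ("\n" : String).toList = ['\n'] from by decide]; exact hn
    simp only [TS_go]
    rw [if_neg (by simp [hn']), hsplit]
    simp only [List.foldl_cons, List.foldl_nil]
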